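-- pv_equiv track=rewrite | github.com/grasshopperTrainer/coding_practice | baekjoon/accepted/11279 최대 힙_heapq.py | solution
-- ===== SOURCE A (Python) =====
-- import heapq
--
-- def solution(nums):
--     answers = []
--     heap = []
--     for n in nums:
--         heapq.heappush(heap, -n)
--         if n == 0:
--             answers.append(-heapq.heappop(heap))
--     return answers
-- ===== SOURCE B (Python) =====
-- def solution(nums):
--     answers = []
--     pool = []
--     for n in nums:
--         pool.append(n)
--         if n == 0:
--             m = max(pool)
--             pool.remove(m)
--             answers.append(m)
--     return answers
-- ===== Notes on version B (the rewrite author's own statement) =====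
-- stated objective: simpler
-- what changed: Replaces the negated binary min-heap (heapq push/pop with sift operations) by a plain pool list: O(1) appends, and each zero triggers a linear max() scan plus remove().
import Mathlib
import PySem

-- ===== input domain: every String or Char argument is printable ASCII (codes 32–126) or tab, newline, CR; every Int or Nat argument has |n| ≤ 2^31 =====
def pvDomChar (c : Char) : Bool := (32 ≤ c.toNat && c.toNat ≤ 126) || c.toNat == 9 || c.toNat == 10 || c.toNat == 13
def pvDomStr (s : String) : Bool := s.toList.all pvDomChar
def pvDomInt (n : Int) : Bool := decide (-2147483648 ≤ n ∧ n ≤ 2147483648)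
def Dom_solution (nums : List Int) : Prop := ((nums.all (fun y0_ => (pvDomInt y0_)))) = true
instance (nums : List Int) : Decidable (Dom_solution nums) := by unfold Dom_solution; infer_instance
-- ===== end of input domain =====

-- B replaces A's negated binary min-heap (heapq) by a plain pool list with a linear max()
-- scan and remove() at each zero — a simpler selection mechanism, same return value.


-- ===== PORT A =====
-- CPython heapq internals, transliterated: heapSdGo is the _siftdown bubble-up loop,
-- heapSuGo the _siftup sink loop (with the smaller-child choice), over List Int with 0-defaults.
def heapSdGo (startpos : Nat) (newitem : Int) (heap : List Int) (pos : Nat) : List Int :=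
  if _h : startpos < pos then
    let parentpos := (pos - 1) / 2
    let parent := heap.getD parentpos 0
    if newitem < parent then
      heapSdGo startpos newitem (heap.set pos parent) parentpos
    else
      heap.set pos newitem
  else
    heap.set pos newitem
termination_by pos
decreasing_by omega

def heapSiftdown (heap : List Int) (startpos pos : Nat) : List Int :=
  heapSdGo startpos (heap.getD pos 0) heap pos

def heapPush (heap : List Int) (item : Int) : List Int :=
  let h := heap ++ [item]
  heapSiftdown h 0 (h.length - 1)

def heapChild (heap : List Int) (endpos pos : Nat) : Nat :=
  if 2*pos + 2 < endpos ∧ ¬ heap.getD (2*pos+1) 0 < heap.getD (2*pos+2) 0 then 2*pos + 2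
  else 2*pos + 1

def heapSuGo (endpos : Nat) (heap : List Int) (pos : Nat) : List Int × Nat :=
  if _h : 2*pos + 1 < endpos then
    let childpos := heapChild heap endpos pos
    heapSuGo endpos (heap.set pos (heap.getD childpos 0)) childpos
  else
    (heap, pos)
termination_by endpos - pos
decreasing_by unfold heapChild; split <;> omega

def heapSiftup (heap : List Int) (pos : Nat) : List Int :=
  let endpos := heap.length
  let newitem := heap.getD pos 0
  let r := heapSuGo endpos heap pos
  heapSiftdown (r.1.set r.2 newitem) pos r.2

def heapPop (heap : List Int) : Int × List Int :=
  let lastelt := heap.getLastD 0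
  let rest := heap.dropLast
  if rest.isEmpty then (lastelt, rest)
  else
    let returnitem := rest.getD 0 0
    (returnitem, heapSiftup (rest.set 0 lastelt) 0)

def solutionStep (st : List Int × List Int) (n : Int) : List Int × List Int :=
  let heap := heapPush st.2 (-n)
  if n = 0 then
    let p := heapPop heap
    (st.1 ++ [-p.1], p.2)
  else
    (st.1, heap)

def solution (nums : List Int) : List Int :=
  (nums.foldl solutionStep ([], [])).1

-- ===== PORT B =====
def solutionAltStep (st : List Int × List Int) (n : Int) : List Int × List Int :=
  let pool := st.2 ++ [n]
  if n = 0 then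
    let m := (PySem.List.max? pool (fun x => x)).getD 0
    (st.1 ++ [m], (PySem.List.remove? pool m).getD pool)
  else
    (st.1, pool)

def solution_alt (nums : List Int) : List Int :=
  (nums.foldl solutionAltStep ([], [])).1


-- ===== PRECONDITION & SPEC =====
def Spec_solution (nums : List Int) (out : List Int) : Prop := out = solution_alt nums
instance (nums : List Int) (out : List Int) : Decidable (Spec_solution nums out) := by unfold Spec_solution; infer_instance

-- ===== CLAIM (what is proved, stated in full; the proofs are below) =====
def Claim_equal_solution : Prop := ∀ (nums : List Int), Dom_solution nums → Spec_solution nums (solution nums)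

-- ===== LEMMAS AND PROOFS =====

theorem sdGo_eq (s : Nat) (ni : Int) (l : List Int) (p : Nat) : heapSdGo s ni l p =
    if s < p then
      (if ni < l.getD ((p-1)/2) 0 then heapSdGo s ni (l.set p (l.getD ((p-1)/2) 0)) ((p-1)/2)
       else l.set p ni)
    else l.set p ni := by
  rw [heapSdGo]
  split <;> rename_i h <;> simp [h, List.getD_eq_getElem?_getD]

theorem suGo_eq (e : Nat) (l : List Int) (p : Nat) : heapSuGo e l p =
    if 2*p + 1 < e then heapSuGo e (l.set p (l.getD (heapChild l e p) 0)) (heapChild l e p)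
    else (l, p) := by
  rw [heapSuGo]
  split <;> rename_i h <;> simp [h]

def IsHeap (l : List Int) : Prop :=
  ∀ i, 0 < i → i < l.length → l.getD ((i-1)/2) 0 ≤ l.getD i 0

def HoleA (l : List Int) (p : Nat) : Prop :=
  ∀ i, 0 < i → i < l.length → i ≠ p → (i-1)/2 ≠ p → l.getD ((i-1)/2) 0 ≤ l.getD i 0

theorem getD_set_self (l : List Int) (i : Nat) (v : Int) (h : i < l.length) :
    (l.set i v).getD i 0 = v := by
  simp [List.getD_eq_getElem?_getD, h]

theorem getD_set_ne (l : List Int) (i j : Nat) (v : Int) (h : j ≠ i) :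
    (l.set i v).getD j 0 = l.getD j 0 := by
  simp [List.getD_eq_getElem?_getD, Ne.symm h]

theorem mset_set (l : List Int) (i : Nat) (v : Int) (h : i < l.length) :
    (↑(l.set i v) : Multiset Int) + {l.getD i 0} = ↑l + {v} := by
  induction l generalizing i with
  | nil => simp at h
  | cons x t ih =>
    cases i with
    | zero =>
      simp only [List.set_cons_zero, List.getD_cons_zero, ← Multiset.cons_coe,
        ← Multiset.singleton_add]
      abel
    | succ n =>
      simp only [List.set_cons_succ, List.getD_cons_succ, ← Multiset.cons_coe,
        Multiset.cons_add]
      rw [ih n (by simpa using h)]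

theorem sdGo_length (ni : Int) : ∀ p (l : List Int), (heapSdGo 0 ni l p).length = l.length := by
  intro p
  induction p using Nat.strong_induction_on with
  | _ p ih =>
    intro l
    rw [sdGo_eq]
    split
    · split
      · rw [ih ((p-1)/2) (by omega)]; simp
      · simp
    · simp

theorem sdGo_mset (ni : Int) : ∀ p (l : List Int), p < l.length →
    (↑(heapSdGo 0 ni l p) : Multiset Int) + {l.getD p 0} = ↑l + {ni} := by
  intro p
  induction p using Nat.strong_induction_on with
  | _ p ih =>
    intro l hp
    rw [sdGo_eq]
    split
    · rename_i h0
      split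
      · rename_i hlt
        have hppp : (p-1)/2 ≠ p := by omega
        have ih' := ih ((p-1)/2) (by omega) (l.set p (l.getD ((p-1)/2) 0))
          (by rw [List.length_set]; omega)
        rw [getD_set_ne _ _ _ _ hppp] at ih'
        have hs : (↑(l.set p (l.getD ((p-1)/2) 0)) : Multiset Int) + {l.getD p 0}
            = ↑l + {l.getD ((p-1)/2) 0} := mset_set l p (l.getD ((p-1)/2) 0) hp
        apply add_right_cancel (b := ({l.getD ((p-1)/2) 0} : Multiset Int))
        conv_lhs => rw [add_right_comm]
        rw [ih']
        conv_lhs => rw [add_right_comm]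
        rw [hs]
        conv_lhs => rw [add_right_comm]
      · exact mset_set l p ni hp
    · exact mset_set l p ni hp

theorem sdGo_heap (ni : Int) : ∀ p (l : List Int), p < l.length →
    HoleA l p →
    (∀ c, c < l.length → c ≠ p → (c-1)/2 = p → ni ≤ l.getD c 0) →
    (∀ c, c < l.length → c ≠ p → (c-1)/2 = p → 0 < p → l.getD ((p-1)/2) 0 ≤ l.getD c 0) →
    IsHeap (heapSdGo 0 ni l p) := by
  intro p
  induction p using Nat.strong_induction_on with
  | _ p ih =>
    intro l hp hA hB hD
    rw [sdGo_eq]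
    split
    · rename_i h0
      split
      · rename_i hlt
        set pp := (p-1)/2 with hpp
        set parent := l.getD pp 0 with hpar
        apply ih pp (by omega) (l.set p parent) (by rw [List.length_set]; omega)
        · -- HoleA
          intro i hi0 hilen hip hipp
          simp only [List.length_set] at hilen
          by_cases hip2 : i = p
          · exact absurd (by omega : (i-1)/2 = pp) hipp
          · by_cases hpar2 : (i-1)/2 = p
            · rw [hpar2, getD_set_self _ _ _ hp, getD_set_ne _ _ _ _ hip2]
              exact hD i hilen hip2 hpar2 h0
            · rw [getD_set_ne _ _ _ _ hpar2, getD_set_ne _ _ _ _ hip2]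
              exact hA i hi0 hilen hip2 hpar2
        · -- hB
          intro c hclen hcp hcpar
          simp only [List.length_set] at hclen
          by_cases hc2 : c = p
          · rw [hc2, getD_set_self _ _ _ hp]; omega
          · rw [getD_set_ne _ _ _ _ hc2]
            have hc0 : 0 < c := by omega
            have := hA c hc0 hclen hc2 (by omega)
            rw [(by omega : (c-1)/2 = pp)] at this
            omega
        · -- hD
          intro c hclen hcp hcpar hpp0
          simp only [List.length_set] at hclen
          have hgp : (pp-1)/2 ≠ p := by omega
          rw [getD_set_ne _ _ _ _ hgp]
          by_cases hc2 : c = p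
          · rw [hc2, getD_set_self _ _ _ hp]
            have := hA pp hpp0 (by omega) (by omega) (by omega)
            exact this
          · rw [getD_set_ne _ _ _ _ hc2]
            have h1 := hA pp hpp0 (by omega) (by omega) (by omega)
            have hc0 : 0 < c := by omega
            have h2 := hA c hc0 hclen hc2 (by omega)
            rw [(by omega : (c-1)/2 = pp)] at h2
            omega
      · rename_i hge
        intro i hi0 hilen
        simp only [List.length_set] at hilen
        by_cases hip : i = p
        · rw [hip, getD_set_self _ _ _ hp, getD_set_ne _ _ _ _ (by omega : (p-1)/2 ≠ p)]
          omega
        · by_cases hpar2 : (i-1)/2 = p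
          · rw [hpar2, getD_set_self _ _ _ hp, getD_set_ne _ _ _ _ hip]
            exact hB i hilen hip hpar2
          · rw [getD_set_ne _ _ _ _ hpar2, getD_set_ne _ _ _ _ hip]
            exact hA i hi0 hilen hip hpar2
    · rename_i h0
      have hp0 : p = 0 := by omega
      subst hp0
      intro i hi0 hilen
      simp only [List.length_set] at hilen
      by_cases hpar2 : (i-1)/2 = 0
      · rw [hpar2, getD_set_self _ _ _ hp, getD_set_ne _ _ _ _ (by omega : i ≠ 0)]
        exact hB i hilen (by omega) hpar2
      · rw [getD_set_ne _ _ _ _ hpar2, getD_set_ne _ _ _ _ (by omega : i ≠ 0)]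
        exact hA i hi0 hilen (by omega) hpar2

def HoleD (l : List Int) (p : Nat) : Prop :=
  ∀ c, c < l.length → c ≠ p → (c-1)/2 = p → 0 < p → l.getD ((p-1)/2) 0 ≤ l.getD c 0

theorem heapChild_gt (l : List Int) (e p : Nat) : p < heapChild l e p := by
  unfold heapChild; split <;> omega

theorem heapChild_lt (l : List Int) (e p : Nat) (h : 2*p+1 < e) : heapChild l e p < e := by
  unfold heapChild; split <;> omega

theorem heapChild_parent (l : List Int) (e p : Nat) : (heapChild l e p - 1)/2 = p := by
  unfold heapChild; split <;> omega

theorem heapChild_min (l : List Int) (e p : Nat) (s : Nat) (hs : s = 2*p+1 ∨ s = 2*p+2)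
    (hse : s < e) : l.getD (heapChild l e p) 0 ≤ l.getD s 0 := by
  unfold heapChild
  split
  · rename_i hc
    rcases hs with h | h <;> subst h
    · exact not_lt.mp hc.2
    · exact le_rfl
  · rename_i hc
    rcases hs with h | h <;> subst h
    · exact le_rfl
    · exact le_of_lt (not_not.mp (not_and.mp hc hse))

theorem suGo_spec : ∀ k (l : List Int) (p : Nat), l.length - p = k → p < l.length →
    HoleA l p → HoleD l p →
    ((heapSuGo l.length l p).1.length = l.length ∧
     (heapSuGo l.length l p).2 < l.length ∧
     ¬ (2*(heapSuGo l.length l p).2 + 1 < l.length) ∧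
     HoleA (heapSuGo l.length l p).1 (heapSuGo l.length l p).2 ∧
     (∀ v, (↑((heapSuGo l.length l p).1.set (heapSuGo l.length l p).2 v) : Multiset Int)
        = ↑(l.set p v))) := by
  intro k
  induction k using Nat.strong_induction_on with
  | _ k ih =>
    intro l p hk hp hA hD
    rw [suGo_eq]
    split
    · rename_i hcl
      have hcgt := heapChild_gt l l.length p
      have hclt := heapChild_lt l l.length p hcl
      have hcpar := heapChild_parent l l.length p
      have hlen : (l.set p (l.getD (heapChild l l.length p) 0)).length = l.length := by simp
      have hA' : HoleA (l.set p (l.getD (heapChild l l.length p) 0)) (heapChild l l.length p) := by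
        intro i hi0 hilen hic hipc
        rw [hlen] at hilen
        by_cases hip : i = p
        · subst hip
          rw [getD_set_self _ _ _ hp,
            getD_set_ne _ _ _ _ (by omega : (i-1)/2 ≠ i)]
          exact hD (heapChild l l.length i) hclt (by omega) hcpar hi0
        · rw [getD_set_ne _ _ _ _ hip]
          by_cases hpp : (i-1)/2 = p
          · rw [hpp, getD_set_self _ _ _ hp]
            exact heapChild_min l l.length p i (by omega) hilen
          · rw [getD_set_ne _ _ _ _ hpp]
            exact hA i hi0 hilen hip hpp
      have hD' : HoleD (l.set p (l.getD (heapChild l l.length p) 0)) (heapChild l l.length p) := by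
        intro d hd hdc hdpar _
        rw [hlen] at hd
        rw [hcpar, getD_set_self _ _ _ hp, getD_set_ne _ _ _ _ (by omega : d ≠ p)]
        have := hA d (by omega) hd (by omega) (by omega : (d-1)/2 ≠ p)
        rw [(by omega : (d-1)/2 = heapChild l l.length p)] at this
        exact this
      have ih' := ih (l.length - heapChild l l.length p) (by omega)
        (l.set p (l.getD (heapChild l l.length p) 0)) (heapChild l l.length p)
        (by rw [hlen]) (by rw [hlen]; exact hclt)
        hA' hD'
      rw [hlen] at ih'
      obtain ⟨i1, i2, i3, i4, i5⟩ := ih'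
      refine ⟨i1, i2, i3, i4, ?_⟩
      intro v
      rw [i5 v]
      apply add_right_cancel (b := ({l.getD (heapChild l l.length p) 0} : Multiset Int))
      have m1 : (↑((l.set p (l.getD (heapChild l l.length p) 0)).set (heapChild l l.length p) v) : Multiset Int)
          + {(l.set p (l.getD (heapChild l l.length p) 0)).getD (heapChild l l.length p) 0}
          = ↑(l.set p (l.getD (heapChild l l.length p) 0)) + {v} := by
        apply mset_set
        rw [hlen]; exact hclt
      rw [getD_set_ne _ _ _ _ (by omega : heapChild l l.length p ≠ p)] at m1
      conv_lhs => rw [m1]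
      apply add_right_cancel (b := ({l.getD p 0} : Multiset Int))
      conv_lhs => rw [add_right_comm, mset_set l p _ hp]
      conv_rhs => rw [add_right_comm, mset_set l p v hp]
      conv_lhs => rw [add_right_comm]
    · exact ⟨rfl, hp, by assumption, hA, fun v => rfl⟩

theorem root_min (l : List Int) (h : IsHeap l) : ∀ i, i < l.length → l.getD 0 0 ≤ l.getD i 0 := by
  intro i
  induction i using Nat.strong_induction_on with
  | _ i ih =>
    intro hi
    rcases Nat.eq_zero_or_pos i with h0 | h0
    · subst h0; exact le_rfl
    · exact le_trans (ih ((i-1)/2) (by omega) (by omega)) (h i h0 hi)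

theorem root_min_mem (l : List Int) (h : IsHeap l) : ∀ a ∈ l, l.getD 0 0 ≤ a := by
  intro a ha
  obtain ⟨j, hj, rfl⟩ := List.mem_iff_getElem.mp ha
  have h2 := root_min l h j hj
  rwa [List.getD_eq_getElem _ _ hj] at h2

theorem getD_append_lt (H : List Int) (x : Int) (j : Nat) (h : j < H.length) :
    (H ++ [x]).getD j 0 = H.getD j 0 := by
  simp [List.getD_eq_getElem?_getD, List.getElem?_append_left h]

theorem getD_concat_len (H : List Int) (x : Int) :
    (H ++ [x]).getD H.length 0 = x := by
  simp [List.getD_eq_getElem?_getD]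

theorem heapPush_spec (H : List Int) (x : Int) (h : IsHeap H) :
    IsHeap (heapPush H x) ∧ (↑(heapPush H x) : Multiset Int) = x ::ₘ ↑H := by
  have hlen : (H ++ [x]).length - 1 = H.length := by simp
  have hgd : (H ++ [x]).getD ((H ++ [x]).length - 1) 0 = x := by
    rw [hlen, getD_concat_len]
  have hp : H.length < (H ++ [x]).length := by simp
  constructor
  · unfold heapPush heapSiftdown
    dsimp only
    rw [hgd, hlen]
    apply sdGo_heap x H.length (H ++ [x]) hp
    · intro i hi0 hilen hip hipp
      simp only [List.length_append, List.length_cons, List.length_nil] at hilen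
      have hi : i < H.length := by omega
      rw [getD_append_lt _ _ _ hi, getD_append_lt _ _ _ (by omega)]
      exact h i hi0 hi
    · intro c hc hcp hcpar
      omega
    · intro c hc hcp hcpar
      omega
  · unfold heapPush heapSiftdown
    dsimp only
    rw [hgd, hlen]
    have := sdGo_mset x H.length (H ++ [x]) hp
    rw [getD_concat_len] at this
    have h2 : (↑(H ++ [x]) : Multiset Int) = x ::ₘ ↑H := by
      rw [show (↑(H ++ [x]) : Multiset Int) = ↑(x :: H) from
        Multiset.coe_eq_coe.mpr (List.perm_append_singleton x H), Multiset.cons_coe]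
    rw [h2] at this
    have : (↑(heapSdGo 0 x (H ++ [x]) H.length) : Multiset Int) + {x} = (x ::ₘ ↑H) + {x} := this
    exact add_right_cancel this

theorem getD_dropLast (l : List Int) (i : Nat) (h : i < l.length - 1) :
    l.dropLast.getD i 0 = l.getD i 0 := by
  have h2 : i < l.dropLast.length := by simp; omega
  rw [List.getD_eq_getElem _ _ h2, List.getD_eq_getElem _ _ (by omega : i < l.length)]
  simp [List.getElem_dropLast]

theorem isHeap_dropLast (l : List Int) (h : IsHeap l) : IsHeap l.dropLast := by
  intro i hi0 hilen
  simp only [List.length_dropLast] at hilen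
  rw [getD_dropLast _ _ hilen, getD_dropLast _ _ (by omega)]
  exact h i hi0 (by omega)

theorem heapPop_spec (H : List Int) (hh : IsHeap H) (hne : H ≠ []) :
    IsHeap (heapPop H).2 ∧ ((heapPop H).1 ::ₘ ↑(heapPop H).2) = (↑H : Multiset Int) ∧
    ∀ a ∈ H, (heapPop H).1 ≤ a := by
  have hsplit : H.dropLast ++ [H.getLastD 0] = H := by
    rw [List.getLastD_eq_getLast?, List.getLast?_eq_getLast hne]
    simp [List.dropLast_concat_getLast hne]
  unfold heapPop
  by_cases hre : H.dropLast.isEmpty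
  · simp only [hre, if_pos]
    have hH : H = [H.getLastD 0] := by
      rw [← hsplit, List.isEmpty_iff.mp hre]; rfl
    refine ⟨?_, ?_, ?_⟩
    · intro i hi0 hilen
      rw [List.length_dropLast, hH] at hilen
      simp at hilen
    · rw [List.isEmpty_iff.mp hre]
      nth_rewrite 2 [hH]
      rfl
    · intro a ha
      rw [hH] at ha
      rw [List.mem_singleton] at ha
      omega
  · simp only [hre, if_neg, Bool.false_eq_true, not_false_iff]
    have hrl : 0 < H.dropLast.length := by
      cases hdl : H.dropLast with
      | nil => rw [hdl] at hre; simp at hre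
      | cons a t => simp
    -- abbreviations
    have hIH : IsHeap H.dropLast := isHeap_dropLast H hh
    have hA0 : HoleA (H.dropLast.set 0 (H.getLastD 0)) 0 := by
      intro i hi0 hilen hip hipp
      rw [List.length_set] at hilen
      rw [getD_set_ne _ _ _ _ hipp, getD_set_ne _ _ _ _ hip]
      exact hIH i hi0 hilen
    have hD0 : HoleD (H.dropLast.set 0 (H.getLastD 0)) 0 := by
      intro c hc hcp hcpar h0
      omega
    have hl0 : (H.dropLast.set 0 (H.getLastD 0)).length = H.dropLast.length := by simp
    have hsu := suGo_spec ((H.dropLast.set 0 (H.getLastD 0)).length - 0)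
      (H.dropLast.set 0 (H.getLastD 0)) 0 rfl (by rw [hl0]; exact hrl) hA0 hD0
    obtain ⟨s1, s2, s3, s4, s5⟩ := hsu
    set rest := H.dropLast with hrest
    set le := H.getLastD 0 with hle
    set l0 := rest.set 0 le with hl0def
    set r := heapSuGo l0.length l0 0 with hr
    have hni : l0.getD 0 0 = le := getD_set_self rest 0 le hrl
    have hr1len : r.1.length = l0.length := s1
    have hAlen : (r.1.set r.2 le).length = l0.length := by
      rw [List.length_set, hr1len]
    have hgd2 : (r.1.set r.2 ((l0).getD 0 0)).getD r.2 0 = le := by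
      rw [hni]
      exact getD_set_self r.1 r.2 le (by rw [hr1len]; exact s2)
    have hsift : heapSiftup l0 0 = heapSdGo 0 le (r.1.set r.2 le) r.2 := by
      unfold heapSiftup heapSiftdown
      dsimp only
      rw [← hr, hgd2, hni]
    constructor
    · -- IsHeap
      rw [hsift]
      apply sdGo_heap le r.2 (r.1.set r.2 le) (by rw [hAlen]; exact s2)
      · intro i hi0 hilen hip hipp
        rw [hAlen] at hilen
        rw [getD_set_ne _ _ _ _ hipp, getD_set_ne _ _ _ _ hip]
        exact s4 i hi0 (by rw [hr1len]; exact hilen) hip hipp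
      · intro c hc hcp hcpar
        rw [hAlen] at hc
        omega
      · intro c hc hcp hcpar
        rw [hAlen] at hc
        omega
    constructor
    · -- multiset
      have hm1 := sdGo_mset le r.2 (r.1.set r.2 le) (by rw [hAlen]; exact s2)
      rw [getD_set_self r.1 r.2 le (by rw [hr1len]; exact s2)] at hm1
      have hm2 : (↑(heapSdGo 0 le (r.1.set r.2 le) r.2) : Multiset Int) = ↑(r.1.set r.2 le) :=
        add_right_cancel hm1
      have hm3 : (↑(r.1.set r.2 le) : Multiset Int) = ↑(l0.set 0 le) := s5 le
      have hm4 : l0.set 0 le = l0 := by rw [hl0def, List.set_set]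
      have hm5 : (↑l0 : Multiset Int) + {rest.getD 0 0} = ↑rest + {le} := mset_set rest 0 le hrl
      rw [hsift, hm2, hm3, hm4]
      have hH2 : (↑H : Multiset Int) = ↑rest + {le} := by
        conv_lhs => rw [← hsplit]
        rw [show (↑(rest ++ [le]) : Multiset Int) = ↑(le :: rest) from
          Multiset.coe_eq_coe.mpr (List.perm_append_singleton le rest), ← Multiset.cons_coe,
          ← Multiset.singleton_add, add_comm]
      rw [hH2, ← hm5, ← Multiset.singleton_add, add_comm]
    · -- min
      intro a ha
      have hg : rest.getD 0 0 = H.getD 0 0 := getD_dropLast H 0 (by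
        rw [hrest, List.length_dropLast] at hrl; omega)
      rw [hg]
      exact root_min_mem H hh a ha

def HeapInv (H P : List Int) : Prop :=
  IsHeap H ∧ (↑H : Multiset Int) = ↑(P.map (fun x => -x))

theorem step_eq (ans H P : List Int) (n : Int) (h : HeapInv H P) :
    (solutionStep (ans, H) n).1 = (solutionAltStep (ans, P) n).1 ∧
    HeapInv (solutionStep (ans, H) n).2 (solutionAltStep (ans, P) n).2 := by
  obtain ⟨hheap, hmset⟩ := h
  obtain ⟨hph, hpm⟩ := heapPush_spec H (-n) hheap
  have hpoolm : (↑(heapPush H (-n)) : Multiset Int) = ↑((P ++ [n]).map (fun x => -x)) := by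
    rw [hpm, hmset, List.map_append]
    rw [show (↑(P.map (fun x => -x) ++ [n].map (fun x => -x)) : Multiset Int)
        = ↑((-n) :: P.map (fun x => -x)) from
      Multiset.coe_eq_coe.mpr (List.perm_append_singleton _ _), ← Multiset.cons_coe]
  unfold solutionStep solutionAltStep
  dsimp only
  by_cases hn : n = 0
  · rw [if_pos hn, if_pos hn]
    have hlenpush : (heapPush H (-n)).length = H.length + 1 := by
      unfold heapPush heapSiftdown
      dsimp only
      rw [sdGo_length]
      simp
    have hne : heapPush H (-n) ≠ [] := by
      intro hE
      rw [hE] at hlenpush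
      simp at hlenpush
    obtain ⟨hpopheap, hpopm, hpopmin⟩ := heapPop_spec _ hph hne
    have hpoolne : P ++ [n] ≠ [] := by simp
    obtain ⟨M, hM⟩ : ∃ M, PySem.List.max? (P ++ [n]) (fun x => x) = some M := by
      cases hmx : PySem.List.max? (P ++ [n]) (fun x => x) with
      | none => exact absurd ((PySem.List.max?_eq_none_iff _ _).mp hmx) hpoolne
      | some M => exact ⟨M, rfl⟩
    have hMmem : M ∈ P ++ [n] := PySem.List.max?_mem hM
    have hMmax : ∀ y ∈ P ++ [n], y ≤ M := by
      have := PySem.List.max?_isMax hM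
      simpa using this
    have hmmem : (heapPop (heapPush H (-n))).1 ∈ heapPush H (-n) := by
      have : (heapPop (heapPush H (-n))).1 ∈ (↑(heapPush H (-n)) : Multiset Int) := by
        rw [← hpopm]
        exact Multiset.mem_cons_self _ _
      exact Multiset.mem_coe.mp this
    have hmneg : ∃ y ∈ P ++ [n], (heapPop (heapPush H (-n))).1 = -y := by
      have h1 : (heapPop (heapPush H (-n))).1 ∈ (P ++ [n]).map (fun x => -x) := by
        have := Multiset.mem_coe.mpr hmmem
        rw [hpoolm] at this
        exact Multiset.mem_coe.mp this
      obtain ⟨y, hy, he⟩ := List.mem_map.mp h1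
      exact ⟨y, hy, he.symm⟩
    have hmle : (heapPop (heapPush H (-n))).1 ≤ -M := by
      apply hpopmin
      have h1 : -M ∈ (P ++ [n]).map (fun x => -x) := List.mem_map.mpr ⟨M, hMmem, rfl⟩
      have h2 := Multiset.mem_coe.mpr h1
      rw [← hpoolm] at h2
      exact Multiset.mem_coe.mp h2
    have hmeq : (heapPop (heapPush H (-n))).1 = -M := by
      obtain ⟨y, hy, he⟩ := hmneg
      have := hMmax y hy
      omega
    have herase : (PySem.List.remove? (P ++ [n]) M).getD (P ++ [n]) = (P ++ [n]).erase M := by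
      rw [PySem.List.remove?_eq_some_erase _ M hMmem]
      rfl
    rw [hM]
    simp only [Option.getD_some]
    refine ⟨by rw [hmeq]; simp, hpopheap, ?_⟩
    rw [herase]
    have hperm : (P ++ [n]).Perm (M :: (P ++ [n]).erase M) := List.perm_cons_erase hMmem
    have hpc : (↑((P ++ [n]).map (fun x => -x)) : Multiset Int)
        = (-M) ::ₘ ↑(((P ++ [n]).erase M).map (fun x => -x)) := by
      rw [Multiset.coe_eq_coe.mpr (hperm.map (fun x => -x)), List.map_cons,
        ← Multiset.cons_coe]
    have h3 : (heapPop (heapPush H (-n))).1 ::ₘ (↑(heapPop (heapPush H (-n))).2 : Multiset Int)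
        = (-M) ::ₘ ↑(((P ++ [n]).erase M).map (fun x => -x)) := by
      rw [hpopm, hpoolm, hpc]
    rw [hmeq] at h3
    exact (Multiset.cons_inj_right _).mp h3
  · rw [if_neg hn, if_neg hn]
    exact ⟨rfl, hph, hpoolm⟩

theorem fold_eq : ∀ (nums ans H P : List Int), HeapInv H P →
    (nums.foldl solutionStep (ans, H)).1 = (nums.foldl solutionAltStep (ans, P)).1 := by
  intro nums
  induction nums with
  | nil => intro ans H P _; rfl
  | cons n t ih =>
    intro ans H P h
    obtain ⟨hfst, hinv⟩ := step_eq ans H P n h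
    rw [List.foldl_cons, List.foldl_cons]
    have hmain := ih (solutionStep (ans, H) n).1 (solutionStep (ans, H) n).2
      (solutionAltStep (ans, P) n).2 hinv
    rw [show solutionAltStep (ans, P) n
        = ((solutionStep (ans, H) n).1, (solutionAltStep (ans, P) n).2) from
      Prod.ext hfst.symm rfl]
    exact hmain

-- ===== VERDICT =====
theorem solution_spec : Claim_equal_solution := by
  unfold Claim_equal_solution
  intro nums _
  unfold Spec_solution solution solution_alt
  exact fold_eq nums [] [] [] ⟨fun i hi0 hilen => by simp at hilen, rfl⟩
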